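-- pv_equiv track=rewrite | github.com/MozziTasteBitter/MedJEx | loader/loader.py | get_longest_for_nested_entities
-- ===== SOURCE A (Python) =====
-- def get_longest_for_nested_entities(tokens, labelings):
--   token_dict = {i: [] for i in range(len(tokens)) }
--   label_lens = {uid: end-start for start, end, uid in labelings}
--
--   for start, end, uid in labelings:
--     for i in range(start, end):
--       token_dict[i].append(uid)
--
--   unavailable_uid_list = []
--   for i in range(len(tokens)):
--     if len(token_dict[i]):
--       if len(token_dict[i]) > 1:
--         max_index_len = (-1, -1)
--         for j, uid in enumerate(token_dict[i]):
--           if label_lens[uid] > max_index_len[1]: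
--             max_index_len = (j, label_lens[uid])
--         for j, uid in enumerate(token_dict[i]):
--           if j != max_index_len[0]:
--             unavailable_uid_list.append(uid)
--   unavailable_uid_set = set(unavailable_uid_list)
--
--   return [(start, end, uid) for start, end, uid in labelings if uid not in unavailable_uid_set]
-- ===== SOURCE B (Python) =====
-- def get_longest_for_nested_entities(tokens, labelings):
--     lens = {uid: end - start for start, end, uid in labelings}
--     bad = set()
--     for i in range(len(tokens)):
--         cover = [uid for start, end, uid in labelings if start <= i < end]
--         if len(cover) > 1:
--             keep, cur = None, -1
--             for uid in cover:
--                 if lens[uid] > cur: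
--                     if keep is not None:
--                         bad.add(keep)
--                     keep, cur = uid, lens[uid]
--                 else:
--                     bad.add(uid)
--     return [(start, end, uid) for start, end, uid in labelings if uid not in bad]
-- ===== Notes on version B (the rewrite author's own statement) =====
-- stated objective: simpler
-- what changed: B drops the token-to-uids inverted index and the unavailable list: per token it collects the covering uids by a direct scan of labelings and blacklists the losers in one pass that tracks the currently-longest uid, instead of A's index build followed by two positional enumerate passes per token; Pre_ excludes only the inputs where A raises KeyError (a label with start < end reaching a token index outside range(len(tokens))).
import Mathlib
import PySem

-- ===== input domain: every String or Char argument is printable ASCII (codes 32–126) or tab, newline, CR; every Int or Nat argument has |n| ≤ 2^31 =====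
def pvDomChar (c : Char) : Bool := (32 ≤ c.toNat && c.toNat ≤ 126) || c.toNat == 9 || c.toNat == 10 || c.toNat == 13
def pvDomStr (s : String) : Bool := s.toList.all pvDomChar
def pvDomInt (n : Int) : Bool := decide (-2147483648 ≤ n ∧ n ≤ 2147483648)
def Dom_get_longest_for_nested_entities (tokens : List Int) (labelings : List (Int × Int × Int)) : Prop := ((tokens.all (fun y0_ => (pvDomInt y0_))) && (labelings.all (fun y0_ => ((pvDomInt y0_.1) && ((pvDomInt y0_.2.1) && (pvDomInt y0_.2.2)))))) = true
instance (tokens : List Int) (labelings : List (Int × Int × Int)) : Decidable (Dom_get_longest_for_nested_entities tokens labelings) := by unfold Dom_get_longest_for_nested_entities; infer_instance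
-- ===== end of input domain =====

-- B scraps the token→uids inverted index and the unavailable list: per token it scans labelings
-- for the covering uids and blacklists the losers in one pass (objective: simpler; not faster).

-- ===== PORT A =====
-- Literal transliteration of A; the Python's intermediate dicts/lists are named helpers.
-- `token_dict[i].append(uid)` is ported with Dict.modify (exact under Pre_, where every touched key
-- is present; Python raises KeyError outside Pre_), and the `label_lens[uid]` / `token_dict[i]`
-- lookups with getD (those keys are always present when A reaches them).
def pvTokenDict0 (n : Int) : PySem.Dict Int (List Int) :=
  (PySem.List.pyRange 0 n 1).foldl (fun d i => d.insert i []) PySem.Dict.empty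

-- the dict comprehension `{uid: end-start for start, end, uid in labelings}` (Source B's `lens` is the
-- same comprehension, so B's port binds this helper too)
def pvLabelLens (labelings : List (Int × Int × Int)) : PySem.Dict Int Int :=
  labelings.foldl (fun d p => d.insert p.2.2 (p.2.1 - p.1)) PySem.Dict.empty

def pvTokenDict (n : Int) (labelings : List (Int × Int × Int)) : PySem.Dict Int (List Int) :=
  labelings.foldl
    (fun d p => (PySem.List.pyRange p.1 p.2.1 1).foldl
      (fun d i => d.modify i [] (fun l => l ++ [p.2.2])) d)
    (pvTokenDict0 n)

def pvUnavailable (n : Int) (labelings : List (Int × Int × Int)) : List Int :=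
  (PySem.List.pyRange 0 n 1).foldl
    (fun acc i =>
      let lst := (pvTokenDict n labelings).getD i []
      if lst.length ≠ 0 then
        if 1 < lst.length then
          let max_index_len : Int × Int :=
            (PySem.List.enumerate lst 0).foldl
              (fun m ju => if (pvLabelLens labelings).getD ju.2 0 > m.2 then (ju.1, (pvLabelLens labelings).getD ju.2 0) else m)
              ((-1 : Int), (-1 : Int))
          (PySem.List.enumerate lst 0).foldl
            (fun a ju => if ju.1 ≠ max_index_len.1 then a ++ [ju.2] else a) acc
        else acc
      else acc)
    []

def get_longest_for_nested_entities (tokens : List Int) (labelings : List (Int × Int × Int)) : List (Int × Int × Int) :=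
  labelings.filter (fun p =>
    !((PySem.Set.ofList (pvUnavailable (tokens.length : Int) labelings)).contains p.2.2))

-- ===== PORT B =====
-- the body of Source B's `for i in range(len(tokens))` loop: collect the uids covering token i and, if
-- there are at least two, blacklist every uid except the currently-longest keeper in one pass
def pvBStep (lens : PySem.Dict Int Int) (labelings : List (Int × Int × Int))
    (bad : PySem.Set Int) (i : Int) : PySem.Set Int :=
  let cover := labelings.filterMap (fun p => if p.1 ≤ i ∧ i < p.2.1 then some p.2.2 else none)
  if 1 < cover.length then
    (cover.foldl
      (fun st u =>
        if lens.getD u 0 > st.2.2 then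
          ((match st.2.1 with | some k => PySem.Set.add st.1 k | none => st.1),
            some u, lens.getD u 0)
        else (PySem.Set.add st.1 u, st.2.1, st.2.2))
      (bad, (none : Option Int), (-1 : Int))).1
  else bad

def get_longest_for_nested_entities_alt (tokens : List Int) (labelings : List (Int × Int × Int)) : List (Int × Int × Int) :=
  let lens := pvLabelLens labelings
  let bad := (PySem.List.pyRange 0 (tokens.length : Int) 1).foldl
    (pvBStep lens labelings) PySem.Set.empty
  labelings.filter (fun p => !(bad.contains p.2.2))

-- ===== PRECONDITION & SPEC =====
-- Pre_ excludes exactly the inputs where A raises KeyError: a label with start < end reaching a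
-- token index outside range(len(tokens)).
def Pre_get_longest_for_nested_entities (tokens : List Int) (labelings : List (Int × Int × Int)) : Prop :=
  ∀ p ∈ labelings, p.1 < p.2.1 → 0 ≤ p.1 ∧ p.2.1 ≤ (tokens.length : Int)
instance (tokens : List Int) (labelings : List (Int × Int × Int)) : Decidable (Pre_get_longest_for_nested_entities tokens labelings) := by unfold Pre_get_longest_for_nested_entities; infer_instance

def pvWitness_get_longest_for_nested_entities : List Int × (List (Int × Int × Int)) :=
  ([0, 0], [(0, 2, 1), (0, 1, 2)])

def Spec_get_longest_for_nested_entities (tokens : List Int) (labelings : List (Int × Int × Int)) (out : List (Int × Int × Int)) : Prop := out = get_longest_for_nested_entities_alt tokens labelings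
instance (tokens : List Int) (labelings : List (Int × Int × Int)) (out : List (Int × Int × Int)) : Decidable (Spec_get_longest_for_nested_entities tokens labelings out) := by unfold Spec_get_longest_for_nested_entities; infer_instance

-- ===== CLAIM =====
def Claim_equal_get_longest_for_nested_entities : Prop := ∀ (tokens : List Int) (labelings : List (Int × Int × Int)), Dom_get_longest_for_nested_entities tokens labelings → Pre_get_longest_for_nested_entities tokens labelings → Spec_get_longest_for_nested_entities tokens labelings (get_longest_for_nested_entities tokens labelings)

-- ===== LEMMAS AND PROOFS =====

-- the labels covering token i, and their uids, in input order
def pvFilt (L : List (Int × Int × Int)) (i : Int) : List (Int × Int × Int) :=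
  L.filter (fun p => decide (p.1 ≤ i ∧ i < p.2.1))

def pvCovU (L : List (Int × Int × Int)) (i : Int) : List Int :=
  (pvFilt L i).map (fun p => p.2.2)

theorem pvFilterMap_covU (L : List (Int × Int × Int)) (i : Int) :
    L.filterMap (fun p => if p.1 ≤ i ∧ i < p.2.1 then some p.2.2 else none) = pvCovU L i := by
  induction L with
  | nil => rfl
  | cons p L ih =>
    simp only [pvCovU, pvFilt, List.filterMap_cons, List.filter_cons, decide_eq_true_eq] at *
    by_cases h : p.1 ≤ i ∧ i < p.2.1 <;> simp [h, ih]

-- token_dict comprehension start: every value is []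
theorem pvTd0_getD (l : List Int) (d : PySem.Dict Int (List Int)) (j : Int)
    (h : d.getD j ([] : List Int) = []) :
    (l.foldl (fun d i => d.insert i []) d).getD j [] = [] := by
  induction l generalizing d with
  | nil => exact h
  | cons x l ih =>
    simp only [List.foldl_cons]
    exact ih _ (by rw [PySem.Dict.getD_insert]; split_ifs <;> simp [h])

theorem pvTokenDict0_getD (n j : Int) : (pvTokenDict0 n).getD j [] = [] :=
  pvTd0_getD _ _ _ (by simp [PySem.Dict.getD_empty])

-- one label's inner range loop appends its uid to exactly the covered keys
theorem pvInner_getD (s e u : Int) (d : PySem.Dict Int (List Int)) (j : Int) :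
    ((PySem.List.pyRange s e 1).foldl (fun d i => d.modify i [] (fun l => l ++ [u])) d).getD j []
      = d.getD j [] ++ (if s ≤ j ∧ j < e then [u] else []) := by
  induction hm : (e - s).toNat generalizing s d with
  | zero =>
    rw [PySem.List.pyRange_one_eq_nil (by omega)]
    simp only [List.foldl_nil]
    rw [if_neg (by omega)]; simp
  | succ m ih =>
    rw [PySem.List.pyRange_one_cons (by omega)]
    simp only [List.foldl_cons]
    rw [ih (s + 1) _ (by omega)]
    rw [PySem.Dict.getD_modify]
    by_cases hj : j = s
    · subst hj
      rw [if_pos rfl, if_neg (by omega), if_pos (by omega)]; simp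
    · rw [if_neg hj]
      by_cases hc : s + 1 ≤ j ∧ j < e
      · rw [if_pos hc, if_pos (by omega)]
      · rw [if_neg hc, if_neg (by omega)]

theorem pvBuild_getD (L : List (Int × Int × Int)) (d : PySem.Dict Int (List Int)) (j : Int) :
    (L.foldl
      (fun d p => (PySem.List.pyRange p.1 p.2.1 1).foldl
        (fun d i => d.modify i [] (fun l => l ++ [p.2.2])) d) d).getD j []
      = d.getD j [] ++ pvCovU L j := by
  induction L generalizing d with
  | nil => simp [pvCovU, pvFilt]
  | cons p L ih =>
    simp only [List.foldl_cons]
    rw [ih, pvInner_getD]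
    simp only [pvCovU, pvFilt, List.filter_cons, decide_eq_true_eq]
    by_cases h : p.1 ≤ j ∧ j < p.2.1 <;> simp [h]

theorem pvTokenDict_getD (n : Int) (L : List (Int × Int × Int)) (j : Int) :
    (pvTokenDict n L).getD j [] = pvCovU L j := by
  rw [pvTokenDict, pvBuild_getD, pvTokenDict0_getD]; simp

-- first-strict-argmax reference recursion; A's enumerate fold reduces to it
def pvFam : List (Int × Int) → Int → Int × (Int × Int) → Int × (Int × Int)
  | [], _, acc => acc
  | x :: xs, s, acc => if x.1 > acc.2.1 then pvFam xs (s + 1) (s, x) else pvFam xs (s + 1) acc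

theorem pvFamA (c : List (Int × Int)) : ∀ (s j : Int) (b : Int × Int),
    (PySem.List.enumerate c s).foldl
      (fun m q => if q.2.1 > m.2 then (q.1, q.2.1) else m) (j, b.1)
      = ((pvFam c s (j, b)).1, (pvFam c s (j, b)).2.1) := by
  induction c with
  | nil => intro s j b; rfl
  | cons x xs ih =>
    intro s j b
    rw [PySem.List.enumerate_cons]
    simp only [List.foldl_cons, pvFam]
    by_cases h : x.1 > b.1
    · rw [if_pos h, if_pos h]; exact ih (s + 1) s x
    · rw [if_neg h, if_neg h]; exact ih (s + 1) j b

theorem pvFamSpec (cs : List (Int × Int)) : ∀ (s j : Int) (b : Int × Int),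
    pvFam cs s (j, b) = (j, b) ∨ ∃ k, ∃ h : k < cs.length, pvFam cs s (j, b) = (s + (k : Int), cs[k]) := by
  induction cs with
  | nil => intro s j b; exact Or.inl rfl
  | cons x xs ih =>
    intro s j b
    simp only [pvFam]
    by_cases h : x.1 > b.1
    · rw [if_pos h]
      rcases ih (s + 1) s x with h0 | ⟨k, hk, hfam⟩
      · refine Or.inr ⟨0, by simp, ?_⟩
        rw [h0]; simp
      · refine Or.inr ⟨k + 1, by simpa using Nat.succ_lt_succ hk, ?_⟩
        rw [hfam, List.getElem_cons_succ]
        have : (s + 1) + (k : Int) = s + ((k + 1 : Nat) : Int) := by push_cast; ring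
        rw [this]
    · rw [if_neg h]
      rcases ih (s + 1) j b with h0 | ⟨k, hk, hfam⟩
      · exact Or.inl h0
      · refine Or.inr ⟨k + 1, by simpa using Nat.succ_lt_succ hk, ?_⟩
        rw [hfam, List.getElem_cons_succ]
        have : (s + 1) + (k : Int) = s + ((k + 1 : Nat) : Int) := by push_cast; ring
        rw [this]

theorem pvFam_fst (cs : List (Int × Int)) (s j : Int) (b : Int × Int) :
    (pvFam cs s (j, b)).1 = j ∨ s ≤ (pvFam cs s (j, b)).1 := by
  rcases pvFamSpec cs s j b with h | ⟨k, hk, h⟩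
  · rw [h]; exact Or.inl rfl
  · rw [h]; right; show s ≤ s + (k:Int); omega

theorem pvEnumerate_map {α β : Type} (f : α → β) (xs : List α) (s : Int) :
    PySem.List.enumerate (xs.map f) s = (PySem.List.enumerate xs s).map (fun q => (q.1, f q.2)) := by
  induction xs generalizing s with
  | nil => rfl
  | cons x xs ih => simp [PySem.List.enumerate_cons, ih]

-- the per-token block of uids A appends to unavailable_uid_list (written exactly with A's lookups)
def pvBlockU (L : List (Int × Int × Int)) (i : Int) : List Int :=
  let c := pvCovU L i
  if 1 < c.length then
    let mj := ((PySem.List.enumerate c 0).foldl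
      (fun m ju => if (pvLabelLens L).getD ju.2 0 > m.2 then (ju.1, (pvLabelLens L).getD ju.2 0) else m)
      ((-1 : Int), (-1 : Int))).1
    ((PySem.List.enumerate c 0).filter (fun ju => decide (ju.1 ≠ mj))).map (fun ju => ju.2)
  else []

theorem pvUnavailable_eq (n : Int) (L : List (Int × Int × Int)) :
    pvUnavailable n L = (PySem.List.pyRange 0 n 1).flatMap (pvBlockU L) := by
  unfold pvUnavailable
  have hstep : ∀ (acc : List Int) (i : Int), i ∈ PySem.List.pyRange 0 n 1 →
      (let lst := (pvTokenDict n L).getD i []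
       if lst.length ≠ 0 then
         if 1 < lst.length then
           let max_index_len : Int × Int :=
             (PySem.List.enumerate lst 0).foldl
               (fun m ju => if (pvLabelLens L).getD ju.2 0 > m.2 then (ju.1, (pvLabelLens L).getD ju.2 0) else m)
               ((-1 : Int), (-1 : Int))
           (PySem.List.enumerate lst 0).foldl
             (fun a ju => if ju.1 ≠ max_index_len.1 then a ++ [ju.2] else a) acc
         else acc
       else acc) = acc ++ pvBlockU L i := by
    intro acc i _
    simp only [pvTokenDict_getD, pvBlockU]
    by_cases hlen : 1 < (pvCovU L i).length
    · rw [if_pos (by omega), if_pos hlen, if_pos hlen]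
      rw [PySem.List.foldl_append_ite]
    · simp only [if_neg hlen]
      by_cases h0 : (pvCovU L i).length ≠ 0
      · rw [if_pos h0]; simp
      · rw [if_neg h0]; simp
  calc (PySem.List.pyRange 0 n 1).foldl _ []
      = (PySem.List.pyRange 0 n 1).foldl (fun acc i => acc ++ pvBlockU L i) [] :=
        PySem.List.foldl_congr_mem _ _ _ _ hstep
    _ = [] ++ (PySem.List.pyRange 0 n 1).flatMap (pvBlockU L) :=
        PySem.List.foldl_append_eq_flatMap _ _ _
    _ = (PySem.List.pyRange 0 n 1).flatMap (pvBlockU L) := by simp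

-- B's inner pass, reshaped over (value, uid) pairs so A's argmax recursion can be compared to it
def pvBF : List (Int × Int) → PySem.Set Int × Option Int × Int → PySem.Set Int
  | [], st => st.1
  | x :: xs, (bad, keep, cur) =>
    if x.1 > cur then
      pvBF xs ((match keep with | some k => PySem.Set.add bad k | none => bad), some x.2, x.1)
    else pvBF xs (PySem.Set.add bad x.2, keep, cur)

theorem pvB_fold_eq (lens : PySem.Dict Int Int) (c : List Int)
    (st : PySem.Set Int × Option Int × Int) :
    (c.foldl
      (fun st u =>
        if lens.getD u 0 > st.2.2 then
          ((match st.2.1 with | some k => PySem.Set.add st.1 k | none => st.1),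
            some u, lens.getD u 0)
        else (PySem.Set.add st.1 u, st.2.1, st.2.2)) st).1
      = pvBF (c.map (fun u => (lens.getD u 0, u))) st := by
  induction c generalizing st with
  | nil => cases st with | mk bad r => cases r with | mk keep cur => rfl
  | cons u c ih =>
    cases st with | mk bad r => cases r with | mk keep cur =>
    simp only [List.foldl_cons, List.map_cons, pvBF]
    by_cases h : lens.getD u 0 > cur
    · rw [if_pos h, if_pos h]; exact ih _
    · rw [if_neg h, if_neg h]; exact ih _

-- membership in B's inner pass, positionally, against the argmax recursion
theorem pvBF_mem (cs : List (Int × Int)) : ∀ (s j : Int) (bad : PySem.Set Int)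
    (b : Int × Int) (keep : Option Int) (x : Int), j < s →
    (x ∈ pvBF cs (bad, keep, b.1) ↔
      x ∈ bad ∨
      (∃ k : Nat, ∃ hk : k < cs.length, cs[k].2 = x ∧ (s + (k : Int)) ≠ (pvFam cs s (j, b)).1) ∨
      (keep = some x ∧ (pvFam cs s (j, b)).1 ≠ j)) := by
  induction cs with
  | nil =>
    intro s j bad b keep x hjs
    simp [pvBF, pvFam]
  | cons y ys ih =>
    intro s j bad b keep x hjs
    simp only [pvBF, pvFam]
    by_cases h : y.1 > b.1
    · rw [if_pos h, if_pos h]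
      have hmj : (pvFam ys (s + 1) (s, y)).1 = s ∨ s + 1 ≤ (pvFam ys (s + 1) (s, y)).1 :=
        pvFam_fst ys (s + 1) s y
      rw [ih (s + 1) s _ y (some y.2) x (by omega)]
      have hbad : x ∈ (match keep with | some k => PySem.Set.add bad k | none => bad) ↔
          x ∈ bad ∨ keep = some x := by
        cases keep with
        | none => simp
        | some k => simp [PySem.Set.mem_add, eq_comm]
      rw [hbad]
      constructor
      · rintro ((hx | hkeep) | ⟨k, hk, hku, hkm⟩ | ⟨hy, hne⟩)
        · exact Or.inl hx
        · exact Or.inr (Or.inr ⟨hkeep, by omega⟩)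
        · refine Or.inr (Or.inl ⟨k + 1, (by simpa using Nat.succ_lt_succ hk), (by simpa using hku), ?_⟩)
          intro hc; exact hkm (by push_cast at hc ⊢; omega)
        · refine Or.inr (Or.inl ⟨0, (by simp), (by have h2 := Option.some.inj hy; simpa using h2), ?_⟩)
          intro hc; exact hne (by push_cast at hc; omega)
      · rintro (hx | ⟨k, hk, hku, hkm⟩ | ⟨hkeep, _⟩)
        · exact Or.inl (Or.inl hx)
        · cases k with
          | zero =>
            refine Or.inr (Or.inr ⟨?_, ?_⟩)
            · exact congrArg some (by simpa using hku)
            · intro hc; exact hkm (by push_cast; omega)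
          | succ k =>
            refine Or.inr (Or.inl ⟨k, (by simpa using hk), (by simpa using hku), ?_⟩)
            intro hc; exact hkm (by push_cast at hc ⊢; omega)
        · exact Or.inl (Or.inr hkeep)
    · rw [if_neg h, if_neg h]
      have hmj : (pvFam ys (s + 1) (j, b)).1 = j ∨ s + 1 ≤ (pvFam ys (s + 1) (j, b)).1 :=
        pvFam_fst ys (s + 1) j b
      rw [ih (s + 1) j _ b keep x (by omega), PySem.Set.mem_add]
      constructor
      · rintro ((hx | hxy) | ⟨k, hk, hku, hkm⟩ | hkeep)
        · exact Or.inl hx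
        · refine Or.inr (Or.inl ⟨0, (by simp), hxy.symm, ?_⟩)
          intro hc; push_cast at hc; omega
        · refine Or.inr (Or.inl ⟨k + 1, (by simpa using Nat.succ_lt_succ hk), (by simpa using hku), ?_⟩)
          intro hc; exact hkm (by push_cast at hc ⊢; omega)
        · exact Or.inr (Or.inr hkeep)
      · rintro (hx | ⟨k, hk, hku, hkm⟩ | hkeep)
        · exact Or.inl (Or.inl hx)
        · cases k with
          | zero => exact Or.inl (Or.inr (by simpa using hku.symm))
          | succ k =>
            refine Or.inr (Or.inl ⟨k, (by simpa using hk), (by simpa using hku), ?_⟩)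
            intro hc; exact hkm (by push_cast at hc ⊢; omega)
        · exact Or.inr (Or.inr hkeep)

-- one outer-loop step of B adds exactly A's block for that token
theorem pvBStep_mem (L : List (Int × Int × Int)) (bad : PySem.Set Int) (i x : Int) :
    x ∈ pvBStep (pvLabelLens L) L bad i ↔ x ∈ bad ∨ x ∈ pvBlockU L i := by
  unfold pvBStep pvBlockU
  rw [pvFilterMap_covU]
  set cv := pvCovU L i with hc
  by_cases hlen : 1 < cv.length
  · rw [if_pos hlen, if_pos hlen]
    rw [pvB_fold_eq]
    set cs := cv.map (fun u => ((pvLabelLens L).getD u 0, u)) with hcs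
    have hA : (PySem.List.enumerate cv 0).foldl
        (fun m ju => if (pvLabelLens L).getD ju.2 0 > m.2 then (ju.1, (pvLabelLens L).getD ju.2 0) else m)
        ((-1 : Int), (-1 : Int))
        = ((pvFam cs 0 ((-1 : Int), ((-1 : Int), (0 : Int)))).1,
           (pvFam cs 0 ((-1 : Int), ((-1 : Int), (0 : Int)))).2.1) := by
      rw [← pvFamA cs 0 (-1) ((-1 : Int), (0 : Int))]
      rw [hcs, pvEnumerate_map, List.foldl_map]
    rw [hA]
    rw [pvBF_mem cs 0 (-1) bad ((-1 : Int), (0 : Int)) none x (by omega)]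
    have hmem : x ∈ ((PySem.List.enumerate cv 0).filter
          (fun ju => decide (ju.1 ≠ (pvFam cs 0 ((-1 : Int), ((-1 : Int), (0 : Int)))).1))).map
          (fun ju => ju.2) ↔
        ∃ k : Nat, ∃ hk : k < cs.length, cs[k].2 = x ∧
          ((0 : Int) + (k : Int)) ≠ (pvFam cs 0 ((-1 : Int), ((-1 : Int), (0 : Int)))).1 := by
      have hlencs : cs.length = cv.length := by rw [hcs, List.length_map]
      constructor
      · intro hx
        rcases List.mem_map.1 hx with ⟨q, hq, rfl⟩
        rcases List.mem_filter.1 hq with ⟨hq1, hq2⟩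
        rcases (PySem.List.mem_enumerate_iff _ _ _).1 hq1 with ⟨k, hk, rfl⟩
        refine ⟨k, (by omega), ?_, ?_⟩
        · simp only [hcs, List.getElem_map]
        · simpa using of_decide_eq_true hq2
      · rintro ⟨k, hk, hku, hkm⟩
        have hk' : k < cv.length := by omega
        refine List.mem_map.2 ⟨((0 : Int) + (k : Int), cv[k]), ?_, ?_⟩
        · refine List.mem_filter.2 ⟨(PySem.List.mem_enumerate_iff _ _ _).2 ⟨k, hk', rfl⟩, ?_⟩
          exact decide_eq_true hkm
        · simp only [hcs, List.getElem_map] at hku; simpa using hku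
    rw [hmem]
    constructor
    · rintro (hx | hx | ⟨hkeep, _⟩)
      · exact Or.inl hx
      · exact Or.inr hx
      · cases hkeep
    · rintro (hx | hx)
      · exact Or.inl hx
      · exact Or.inr (Or.inl hx)
  · rw [if_neg hlen, if_neg hlen]; simp

theorem pvBad_mem (L : List (Int × Int × Int)) (l : List Int) :
    ∀ (bad : PySem.Set Int) (x : Int),
    x ∈ l.foldl (pvBStep (pvLabelLens L) L) bad ↔ x ∈ bad ∨ ∃ i ∈ l, x ∈ pvBlockU L i := by
  induction l with
  | nil => intro bad x; simp
  | cons i l ih =>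
    intro bad x
    simp only [List.foldl_cons]
    rw [ih, pvBStep_mem]
    constructor
    · rintro ((hx | hb) | ⟨i', hi', hb⟩)
      · exact Or.inl hx
      · exact Or.inr ⟨i, List.mem_cons_self, hb⟩
      · exact Or.inr ⟨i', List.mem_cons_of_mem _ hi', hb⟩
    · rintro (hx | ⟨i', hi', hb⟩)
      · exact Or.inl (Or.inl hx)
      · rcases List.mem_cons.1 hi' with rfl | hi''
        · exact Or.inl (Or.inr hb)
        · exact Or.inr ⟨i', hi'', hb⟩

-- ===== VERDICT (by name: the statement is the Claim_ definition above) =====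
theorem get_longest_for_nested_entities_spec : Claim_equal_get_longest_for_nested_entities := by
  intro tokens labelings _ _
  unfold Spec_get_longest_for_nested_entities
  unfold get_longest_for_nested_entities get_longest_for_nested_entities_alt
  apply List.filter_congr
  intro p _
  have hA : ((PySem.Set.ofList (pvUnavailable (tokens.length : Int) labelings)).contains p.2.2)
      = ((PySem.List.pyRange 0 (tokens.length : Int) 1).foldl
          (pvBStep (pvLabelLens labelings) labelings) PySem.Set.empty).contains p.2.2 := by
    rw [Bool.eq_iff_iff]
    simp only [PySem.Set.contains_iff]
    rw [PySem.Set.mem_ofList, pvUnavailable_eq, List.mem_flatMap,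
      pvBad_mem labelings _ PySem.Set.empty p.2.2]
    simp [PySem.Set.empty]
  rw [hA]
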